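-- pv_equiv track=rewrite | github.com/uiucCme/Practicum | Yikang's/Attribuites Construction/order_execution_time.py | ten_orderbook_output
-- ===== SOURCE A (Python) =====
-- from heapq import nlargest, nsmallest
--
-- def ten_orderbook_output(time, bid, ask, messageType):
--     array_value = [0] * 43
--     array_value[0] = time
--     array_value[1] = ord(messageType)
--     bid_position = 2
--     ask_position = 23
--     for key in reversed(nlargest(10, bid)):
--         array_value[bid_position] = key
--         array_value[bid_position + 1] = bid[key]
--         bid_position += 2
--     array_value[22] = 999999999
--     for key in nsmallest(10, ask):
--         array_value[ask_position] = key
--         array_value[ask_position + 1] = ask[key]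
--         ask_position += 2
--     return (array_value)
-- ===== SOURCE B (Python) =====
-- def ten_orderbook_output(time, bid, ask, messageType):
--     top_bids = sorted(bid)[-10:]          # ten largest bid keys, ascending
--     low_asks = sorted(ask)[:10]           # ten smallest ask keys, ascending
--     bid_part = [x for k in top_bids for x in (k, bid[k])]
--     ask_part = [x for k in low_asks for x in (k, ask[k])]
--     return ([time, ord(messageType)]
--             + bid_part + [0] * (20 - len(bid_part))
--             + [999999999]
--             + ask_part + [0] * (20 - len(ask_part)))
-- ===== Notes on version B (the rewrite author's own statement) =====
-- stated objective: simpler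
-- what changed: Replaces the mutable 43-slot array with two heap selections (nlargest/nsmallest) and position-counter fill loops by two full ascending sorts sliced to ten keys and a direct construction of the result by list concatenation with explicit zero padding.
import Mathlib
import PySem

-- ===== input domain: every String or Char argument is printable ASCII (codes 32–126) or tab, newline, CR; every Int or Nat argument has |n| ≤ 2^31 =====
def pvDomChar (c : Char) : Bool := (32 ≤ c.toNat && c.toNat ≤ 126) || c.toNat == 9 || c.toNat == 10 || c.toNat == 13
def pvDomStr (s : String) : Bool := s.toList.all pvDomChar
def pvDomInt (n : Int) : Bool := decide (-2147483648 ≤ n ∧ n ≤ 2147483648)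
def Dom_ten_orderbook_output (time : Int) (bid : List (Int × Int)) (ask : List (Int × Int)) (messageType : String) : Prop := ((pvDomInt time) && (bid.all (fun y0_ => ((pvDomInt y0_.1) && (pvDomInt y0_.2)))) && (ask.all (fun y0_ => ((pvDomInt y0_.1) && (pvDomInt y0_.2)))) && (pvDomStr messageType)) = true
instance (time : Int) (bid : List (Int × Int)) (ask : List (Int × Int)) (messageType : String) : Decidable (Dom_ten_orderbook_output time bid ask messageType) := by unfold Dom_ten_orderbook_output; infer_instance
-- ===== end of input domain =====

-- B builds the 43-element row by sorting each dict's keys once, slicing to ten, and concatenating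
-- the pieces with explicit zero padding, instead of A's heap selections written into a mutated array.
-- Equivalence is about the return value; neither version mutates its arguments.

-- ===== PORT A =====
-- ord(s): code point of the single character (its value outside Pre_ is irrelevant: Python raises there)
def pyOrd (s : String) : Int :=
  match s.toList with
  | [c] => (c.toNat : Int)
  | _ => 0

-- one iteration of A's fill loops: array_value[pos] = key; array_value[pos+1] = d[key]; pos += 2
-- (List.set is exact here: the loop always writes at a valid non-negative index)
def fillStep (d : PySem.Dict Int Int) (p : List Int × Nat) (key : Int) : List Int × Nat :=
  ((p.1.set p.2 key).set (p.2 + 1) (d.getD key 0), p.2 + 2)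

def ten_orderbook_output (time : Int) (bid : List (Int × Int)) (ask : List (Int × Int)) (messageType : String) : List Int :=
  let dbid := PySem.Dict.ofList bid
  let dask := PySem.Dict.ofList ask
  let arr0 := ((List.replicate 43 (0 : Int)).set 0 time).set 1 (pyOrd messageType)
  -- heapq.nlargest(10, bid): documented equivalent of sorted(bid, reverse=True)[:10]
  let topBids := (PySem.List.sorted dbid.keys (fun x => x) true).take 10
  let st1 := topBids.reverse.foldl (fillStep dbid) (arr0, 2)
  let arr1 := st1.1.set 22 999999999
  -- heapq.nsmallest(10, ask): documented equivalent of sorted(ask)[:10]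
  let lowAsks := (PySem.List.sorted dask.keys (fun x => x) false).take 10
  (lowAsks.foldl (fillStep dask) (arr1, 23)).1

-- ===== PORT B =====
-- [x for k in ks for x in (k, d[k])]
def pairOut (d : PySem.Dict Int Int) (ks : List Int) : List Int :=
  ks.flatMap (fun k => [k, d.getD k 0])

def ten_orderbook_output_alt (time : Int) (bid : List (Int × Int)) (ask : List (Int × Int)) (messageType : String) : List Int :=
  let dbid := PySem.Dict.ofList bid
  let dask := PySem.Dict.ofList ask
  let topBids := PySem.List.slice (PySem.List.sorted dbid.keys (fun x => x) false) (some (-10)) none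
  let lowAsks := PySem.List.slice (PySem.List.sorted dask.keys (fun x => x) false) none (some 10)
  let bidPart := pairOut dbid topBids
  let askPart := pairOut dask lowAsks
  [time, pyOrd messageType] ++ bidPart ++ List.replicate (20 - bidPart.length) 0
    ++ [999999999] ++ askPart ++ List.replicate (20 - askPart.length) 0

-- ===== PRECONDITION & SPEC =====
-- Pre_ excludes only a messageType that is not a single character: there Python's ord() raises
-- TypeError, in A and in B alike.
def Pre_ten_orderbook_output (time : Int) (bid : List (Int × Int)) (ask : List (Int × Int)) (messageType : String) : Prop :=
  messageType.toList.length = 1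
instance (time : Int) (bid : List (Int × Int)) (ask : List (Int × Int)) (messageType : String) : Decidable (Pre_ten_orderbook_output time bid ask messageType) := by unfold Pre_ten_orderbook_output; infer_instance

def pvWitness_ten_orderbook_output : Int × (List (Int × Int)) × (List (Int × Int)) × String :=
  (5, [(3, 7), (1, 9)], [(4, 2)], "A")

def Spec_ten_orderbook_output (time : Int) (bid : List (Int × Int)) (ask : List (Int × Int)) (messageType : String) (out : List Int) : Prop := out = ten_orderbook_output_alt time bid ask messageType
instance (time : Int) (bid : List (Int × Int)) (ask : List (Int × Int)) (messageType : String) (out : List Int) : Decidable (Spec_ten_orderbook_output time bid ask messageType out) := by unfold Spec_ten_orderbook_output; infer_instance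

-- ===== CLAIM (what is proved, stated in full; the proofs are below) =====
def Claim_equal_ten_orderbook_output : Prop := ∀ (time : Int) (bid : List (Int × Int)) (ask : List (Int × Int)) (messageType : String), Dom_ten_orderbook_output time bid ask messageType → Pre_ten_orderbook_output time bid ask messageType → Spec_ten_orderbook_output time bid ask messageType (ten_orderbook_output time bid ask messageType)

-- ===== LEMMAS AND PROOFS =====

lemma set_set_splice (arr : List Int) (p : Nat) (k v : Int) (h : p + 2 ≤ arr.length) :
    (arr.set p k).set (p + 1) v = arr.take p ++ [k, v] ++ arr.drop (p + 2) := by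
  have hp : p ≤ arr.length := by omega
  have h1 : arr.drop (p + 1) = arr[p + 1] :: arr.drop (p + 2) :=
    List.drop_eq_getElem_cons (by omega)
  rw [List.set_eq_take_cons_drop k (by omega)]
  rw [show arr.take p ++ k :: arr.drop (p + 1) = (arr.take p ++ [k]) ++ arr.drop (p + 1) by simp]
  have hlen : (arr.take p ++ [k]).length = p + 1 := by simp [Nat.min_eq_left hp]
  rw [List.set_append_right _ v (by omega), hlen, Nat.sub_self, h1, List.set_cons_zero]
  simp

lemma length_pairOut (d : PySem.Dict Int Int) (ks : List Int) :
    (pairOut d ks).length = 2 * ks.length := by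
  induction ks with
  | nil => rfl
  | cons k t ih => simp [pairOut] at ih ⊢; omega

lemma fill_eq (d : PySem.Dict Int Int) (ks : List Int) (arr : List Int) (pos : Nat)
    (h : pos + 2 * ks.length ≤ arr.length) :
    (ks.foldl (fillStep d) (arr, pos)).1
      = arr.take pos ++ pairOut d ks ++ arr.drop (pos + 2 * ks.length) := by
  induction ks generalizing arr pos with
  | nil => simp [pairOut]
  | cons k t ih =>
    simp only [List.length_cons] at h
    simp only [List.foldl_cons, fillStep]
    rw [ih _ (pos + 2) (by simp; omega)]
    rw [set_set_splice arr pos k (d.getD k 0) (by omega)]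
    have hpre : (arr.take pos ++ [k, d.getD k 0]).length = pos + 2 := by
      simp [Nat.min_eq_left (by omega : pos ≤ arr.length)]
    rw [show arr.take pos ++ [k, d.getD k 0] ++ arr.drop (pos + 2)
          = (arr.take pos ++ [k, d.getD k 0]) ++ arr.drop (pos + 2) by simp]
    rw [List.take_left' hpre,
        show pos + 2 + 2 * t.length = (arr.take pos ++ [k, d.getD k 0]).length + 2 * t.length by omega,
        List.drop_length_add_append, List.drop_drop,
        show pos + 2 + 2 * t.length = pos + 2 * (k :: t).length by simp; omega]
    simp [pairOut]

lemma assemble (d e : PySem.Dict Int Int) (tb ta : List Int) (t o : Int)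
    (hnb : tb.length ≤ 10) (hna : ta.length ≤ 10) :
    (ta.foldl (fillStep e)
        (((tb.foldl (fillStep d) ((((List.replicate 43 (0:Int)).set 0 t).set 1 o), 2)).1).set 22 999999999,
          23)).1
      = [t, o] ++ pairOut d tb ++ List.replicate (20 - (pairOut d tb).length) 0
          ++ [999999999] ++ pairOut e ta ++ List.replicate (20 - (pairOut e ta).length) 0 := by
  have harr0 : ((List.replicate 43 (0:Int)).set 0 t).set 1 o = [t, o] ++ List.replicate 41 0 := by
    simp [List.replicate_succ]
  rw [harr0, fill_eq d tb _ 2 (by simp; omega)]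
  rw [List.take_left' (show ([t, o] : List Int).length = 2 from rfl),
      show 2 + 2 * tb.length = ([t, o] : List Int).length + 2 * tb.length from rfl,
      List.drop_length_add_append, List.drop_replicate]
  have hrep : List.replicate (41 - 2 * tb.length) (0:Int)
      = List.replicate (20 - 2 * tb.length) 0 ++ (0:Int) :: List.replicate 20 0 := by
    rw [show (0:Int) :: List.replicate 20 0 = List.replicate 21 0 from rfl, ← List.replicate_add]
    congr 1
    omega
  rw [hrep]
  rw [show [t, o] ++ pairOut d tb ++ (List.replicate (20 - 2 * tb.length) (0:Int) ++ 0 :: List.replicate 20 0)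
        = ([t, o] ++ pairOut d tb) ++ (List.replicate (20 - 2 * tb.length) (0:Int) ++ 0 :: List.replicate 20 0) by simp]
  rw [List.set_append_right _ _ (by simp [length_pairOut]; try omega)]
  rw [List.set_append_right _ _ (by simp [length_pairOut]; try omega)]
  rw [show 22 - ([t, o] ++ pairOut d tb).length - (List.replicate (20 - 2 * tb.length) (0:Int)).length = 0 by
        simp [length_pairOut]; try omega,
      List.set_cons_zero]
  rw [fill_eq e ta _ 23 (by simp [length_pairOut]; omega)]
  rw [show ([t, o] ++ pairOut d tb) ++ (List.replicate (20 - 2 * tb.length) (0:Int) ++ (999999999:Int) :: List.replicate 20 0)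
        = (([t, o] ++ pairOut d tb) ++ (List.replicate (20 - 2 * tb.length) (0:Int) ++ [(999999999:Int)])) ++ List.replicate 20 0 by simp]
  have hM : ((([t, o] ++ pairOut d tb) ++ (List.replicate (20 - 2 * tb.length) (0:Int) ++ [(999999999:Int)]))).length = 23 := by
    simp [length_pairOut]; omega
  rw [List.take_left' hM, show 23 + 2 * ta.length
        = ((([t, o] ++ pairOut d tb) ++ (List.replicate (20 - 2 * tb.length) (0:Int) ++ [(999999999:Int)]))).length + 2 * ta.length by omega,
      List.drop_length_add_append, List.drop_replicate]
  simp [length_pairOut, List.append_assoc]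

lemma sorted_rev_eq_reverse (ks : List Int) (hnd : ks.Nodup) :
    PySem.List.sorted ks (fun x => x) true = (PySem.List.sorted ks (fun x => x) false).reverse := by
  apply PySem.List.sorted_rev_eq_of_perm_of_pairwise_gt
  · exact (List.reverse_perm _).trans (PySem.List.sorted_perm ks (fun x => x) false)
  · rw [List.pairwise_reverse]
    have hle := PySem.List.sorted_pairwise ks (fun x => x)
    have hne : (PySem.List.sorted ks (fun x => x) false).Nodup :=
      ((PySem.List.sorted_perm ks (fun x => x) false).nodup_iff).mpr hnd
    exact (hle.and hne).imp (fun h => lt_of_le_of_ne h.1 h.2)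

lemma topBids_eq (ks : List Int) (hnd : ks.Nodup) :
    ((PySem.List.sorted ks (fun x => x) true).take 10).reverse
      = PySem.List.slice (PySem.List.sorted ks (fun x => x) false) (some (-10)) none := by
  rw [PySem.List.slice_from_neg_ofNat _ 10 (by omega), sorted_rev_eq_reverse ks hnd,
    List.take_reverse, List.reverse_reverse]

theorem ten_orderbook_output_spec_aux (time : Int) (bid : List (Int × Int)) (ask : List (Int × Int)) (messageType : String) :
    ten_orderbook_output time bid ask messageType = ten_orderbook_output_alt time bid ask messageType := by
  unfold ten_orderbook_output ten_orderbook_output_alt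
  simp only []
  rw [topBids_eq _ (PySem.Dict.nodup_keys_ofList bid)]
  rw [show PySem.List.slice (PySem.List.sorted (PySem.Dict.ofList ask).keys (fun x => x) false) none (some 10)
        = (PySem.List.sorted (PySem.Dict.ofList ask).keys (fun x => x) false).take 10 by simp [pysem]]
  apply assemble
  · rw [PySem.List.slice_from_neg_ofNat _ 10 (by omega)]
    simp
    omega
  · simp

-- ===== VERDICT (by name: the statement is the Claim_ definition above) =====
theorem ten_orderbook_output_spec : Claim_equal_ten_orderbook_output := by
  intro time bid ask messageType _ _
  unfold Spec_ten_orderbook_output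
  exact ten_orderbook_output_spec_aux time bid ask messageType
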